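-- pv_equiv track=rewrite | github.com/elifesciences-publications/vacv-ont-manuscript | vacv-plot/sb.py | count
-- ===== SOURCE A (Python) =====
-- def count(genomes, cn):
--     """
--     Used in conjuction with `get_vals`.
--     Counts the proportions of all_wt, all_mut,
--     or mixed genomes in a given set of `data`,
--     up to a copy number of `cn`.
--     """
--     all_wt, all_mut, mixed = 0, 0, 0
--     for genome in genomes:
--         if len(genome) != cn: continue
--         # homogenous WT
--         if all([i == 0 for i in genome]): all_wt += 1
--         # homogenous H47R
--         elif all([i == 1 for i in genome]): all_mut += 1
--         # "mixed" -- requires genome to be longer than 1 copy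
--         elif len(set(genome)) > 1 and all([i in (0, 1) for i in genome]):
--             mixed += 1
--     return all_wt, mixed, all_mut
-- ===== SOURCE B (Python) =====
-- def count(genomes, cn):
--     """
--     Classifies genomes of copy number `cn` by their canonical value
--     signature sorted(set(g)), then reads off the three signature counts:
--     [] or [0] -> all-WT, [1] -> all-mutant, [0, 1] -> mixed.
--     """
--     sigs = [sorted(set(g)) for g in genomes if len(g) == cn]
--     return (sigs.count([]) + sigs.count([0]),
--             sigs.count([0, 1]),
--             sigs.count([1]))
-- ===== Notes on version B (the rewrite author's own statement) =====
-- stated objective: alternative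
-- what changed: Replaces A's per-genome three-branch if/elif classification with accumulators by a map to a canonical signature sorted(set(g)) for each correct-length genome followed by four multiset counts of the literal signatures [], [0], [1], [0,1].
import Mathlib
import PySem

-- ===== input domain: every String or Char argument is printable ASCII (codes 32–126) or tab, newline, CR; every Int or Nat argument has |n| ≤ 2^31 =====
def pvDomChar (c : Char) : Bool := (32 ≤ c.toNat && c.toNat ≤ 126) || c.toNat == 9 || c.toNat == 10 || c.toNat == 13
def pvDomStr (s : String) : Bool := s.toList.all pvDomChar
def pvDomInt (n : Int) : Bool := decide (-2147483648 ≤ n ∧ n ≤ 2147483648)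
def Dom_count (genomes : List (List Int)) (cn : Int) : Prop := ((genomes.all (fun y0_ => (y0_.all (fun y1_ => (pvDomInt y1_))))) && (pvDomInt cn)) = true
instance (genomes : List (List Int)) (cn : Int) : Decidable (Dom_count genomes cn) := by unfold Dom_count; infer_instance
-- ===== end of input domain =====

-- B replaces A's three-branch if/elif classification loop with a map to canonical
-- signatures sorted(set(g)) and four literal-signature counts (objective: alternative).

-- ===== PORT A =====
def count (genomes : List (List Int)) (cn : Int) : Int × Int × Int :=
  let st := genomes.foldl (fun (st : Int × Int × Int) (genome : List Int) =>
    let (all_wt, all_mut, mixed) := st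
    if (genome.length : Int) ≠ cn then st
    else if genome.all (fun i => i == 0) then (all_wt + 1, all_mut, mixed)
    else if genome.all (fun i => i == 1) then (all_wt, all_mut + 1, mixed)
    else if PySem.Set.len (PySem.Set.ofList genome) > 1 ∧ genome.all (fun i => i == 0 || i == 1) then
      (all_wt, all_mut, mixed + 1)
    else st) (0, 0, 0)
  (st.1, st.2.2, st.2.1)

-- ===== PORT B =====
-- canonical signature of a genome: sorted(set(g))
def keySig (g : List Int) : List Int :=
  PySem.List.sorted (PySem.Set.ofList g) (fun x => x) false

def count_alt (genomes : List (List Int)) (cn : Int) : Int × Int × Int :=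
  let sigs := (genomes.filter (fun g => (g.length : Int) == cn)).map keySig
  ((PySem.List.count sigs ([] : List Int) : Int) + (PySem.List.count sigs [0] : Int),
   (PySem.List.count sigs [0, 1] : Int),
   (PySem.List.count sigs [1] : Int))

-- ===== PRECONDITION & SPEC =====
def Spec_count (genomes : List (List Int)) (cn : Int) (out : Int × Int × Int) : Prop := out = count_alt genomes cn
instance (genomes : List (List Int)) (cn : Int) (out : Int × Int × Int) : Decidable (Spec_count genomes cn out) := by unfold Spec_count; infer_instance

-- ===== CLAIM (what is proved, stated in full; the proofs are below) =====
def Claim_equal_count : Prop := ∀ (genomes : List (List Int)) (cn : Int), Dom_count genomes cn → Spec_count genomes cn (count genomes cn)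

-- ===== LEMMAS AND PROOFS =====

-- membership in keySig is membership in g
theorem mem_keySig (g : List Int) (i : Int) : i ∈ keySig g ↔ i ∈ g := by
  simp [keySig, PySem.List.mem_sorted, PySem.Set.mem_ofList]

-- keySig g = [] iff g is empty
theorem keySig_nil_iff (g : List Int) : keySig g = [] ↔ g = [] := by
  constructor
  · intro h
    cases g with
    | nil => rfl
    | cons a t =>
      exfalso
      have ha := (mem_keySig (a :: t) a).mpr List.mem_cons_self
      rw [h] at ha
      exact List.not_mem_nil ha
  · intro h; subst h; rfl

-- keySig g is a singleton [v] iff g is nonempty and constantly v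
theorem keySig_singleton_iff (g : List Int) (v : Int) :
    keySig g = [v] ↔ g ≠ [] ∧ ∀ i ∈ g, i = v := by
  constructor
  · intro h
    constructor
    · intro hg
      subst hg
      have hc := congrArg List.length h
      simp only [keySig, PySem.List.length_sorted] at hc
      simp at hc
    · intro i hi
      have hm := (mem_keySig g i).mpr hi
      rw [h] at hm
      simpa using hm
  · rintro ⟨hne, hall⟩
    have hperm : ([v] : List Int).Perm (PySem.Set.ofList g) := by
      apply (List.perm_ext_iff_of_nodup (by simp) (PySem.Set.nodup_ofList g)).mpr
      intro x
      rw [PySem.Set.mem_ofList]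
      constructor
      · intro hx
        simp only [List.mem_singleton] at hx
        subst hx
        obtain ⟨a, t, rfl⟩ := List.exists_cons_of_ne_nil hne
        have ha := hall a List.mem_cons_self
        subst ha
        exact List.mem_cons_self
      · intro hx
        simp [hall x hx]
    exact PySem.List.sorted_id_eq_of_perm_of_pairwise _ _ hperm (by simp)

-- keySig g = [0, 1] iff g contains 0 and 1 and only 0/1 values
theorem keySig_pair_iff (g : List Int) :
    keySig g = [0, 1] ↔ (0 : Int) ∈ g ∧ (1 : Int) ∈ g ∧ ∀ i ∈ g, i = 0 ∨ i = 1 := by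
  constructor
  · intro h
    refine ⟨(mem_keySig g 0).mp (by rw [h]; simp), (mem_keySig g 1).mp (by rw [h]; simp), ?_⟩
    intro i hi
    have hm := (mem_keySig g i).mpr hi
    rw [h] at hm
    simpa using hm
  · rintro ⟨h0, h1, hall⟩
    have hperm : ([0, 1] : List Int).Perm (PySem.Set.ofList g) := by
      apply (List.perm_ext_iff_of_nodup (by decide) (PySem.Set.nodup_ofList g)).mpr
      intro x
      rw [PySem.Set.mem_ofList]
      constructor
      · intro hx
        rcases List.mem_pair.mp hx with rfl | rfl
        · exact h0
        · exact h1
      · intro hx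
        rcases hall x hx with rfl | rfl <;> simp
    exact PySem.List.sorted_id_eq_of_perm_of_pairwise _ _ hperm (by decide)

-- Branch predicates of A (after the length test), as Bools
def genomeIn01 (g : List Int) : Bool := g.all (fun i => i == 0 || i == 1)
def qW (g : List Int) : Bool := g.all (fun i => i == 0)
def qM (g : List Int) : Bool := !qW g && g.all (fun i => i == 1)
def qX (g : List Int) : Bool :=
  !qW g && !(g.all (fun i => i == 1)) &&
  decide (PySem.Set.len (PySem.Set.ofList g) > 1 ∧ genomeIn01 g = true)

-- a Nodup 0/1-valued list of length ≥ 2 contains both 0 and 1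
theorem both_mem_of_nodup (s : List Int) (hnd : s.Nodup)
    (hall : ∀ x ∈ s, x = 0 ∨ x = 1) (hlen : 1 < s.length) :
    (0 : Int) ∈ s ∧ (1 : Int) ∈ s := by
  match s with
  | [] => simp at hlen
  | [a] => simp at hlen
  | a :: b :: t =>
    have hab : a ≠ b := by
      have := List.nodup_cons.mp hnd
      exact fun h => this.1 (h ▸ List.mem_cons_self)
    have ha := hall a List.mem_cons_self
    have hb := hall b (by simp)
    rcases ha with rfl | rfl <;> rcases hb with rfl | rfl <;> simp_all

-- qW g holds iff the signature is [] or [0]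
theorem qW_iff_sig (g : List Int) : qW g = true ↔ (keySig g = [] ∨ keySig g = [0]) := by
  simp only [qW, List.all_eq_true, beq_iff_eq]
  constructor
  · intro h
    cases g with
    | nil => left; rfl
    | cons a t =>
      right
      exact (keySig_singleton_iff (a :: t) 0).mpr ⟨by simp, h⟩
  · rintro (h | h)
    · intro i hi
      rw [(keySig_nil_iff g).mp h] at hi
      exact absurd hi List.not_mem_nil
    · exact ((keySig_singleton_iff g 0).mp h).2

-- qM g holds iff the signature is [1]
theorem qM_iff_sig (g : List Int) : qM g = true ↔ keySig g = [1] := by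
  rw [qM, keySig_singleton_iff g 1]
  simp only [Bool.and_eq_true, Bool.not_eq_eq_eq_not, Bool.not_true, List.all_eq_true, beq_iff_eq]
  constructor
  · rintro ⟨hw, h1⟩
    refine ⟨?_, h1⟩
    rintro rfl
    simp [qW] at hw
  · rintro ⟨hne, h1⟩
    refine ⟨?_, h1⟩
    obtain ⟨a, t, rfl⟩ := List.exists_cons_of_ne_nil hne
    have ha := h1 a List.mem_cons_self
    subst ha
    simp [qW]

-- qX g holds iff the signature is [0, 1]
theorem qX_iff_sig (g : List Int) : qX g = true ↔ keySig g = [0, 1] := by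
  constructor
  · intro h
    simp only [qX, Bool.and_eq_true, decide_eq_true_eq] at h
    obtain ⟨⟨-, -⟩, hlen, hin⟩ := h
    have hall : ∀ x ∈ PySem.Set.ofList g, x = 0 ∨ x = 1 := by
      intro x hx
      have hxg := (PySem.Set.mem_ofList g x).mp hx
      have := (List.all_eq_true.mp hin) x hxg
      simpa using this
    have hlen' : 1 < (PySem.Set.ofList g).length := by
      simpa [PySem.Set.len] using hlen
    obtain ⟨h0, h1⟩ := both_mem_of_nodup _ (PySem.Set.nodup_ofList g) hall hlen'
    refine (keySig_pair_iff g).mpr ⟨(PySem.Set.mem_ofList g 0).mp h0,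
      (PySem.Set.mem_ofList g 1).mp h1, ?_⟩
    intro i hi
    have := (List.all_eq_true.mp hin) i hi
    simpa using this
  · intro h
    obtain ⟨h0, h1, hall⟩ := (keySig_pair_iff g).mp h
    have hin : genomeIn01 g = true := by
      simp only [genomeIn01, List.all_eq_true]
      intro i hi
      rcases hall i hi with rfl | rfl <;> simp
    have hw : qW g = false := by
      simp only [qW, Bool.eq_false_iff, ne_eq, List.all_eq_true, not_forall]
      exact ⟨1, h1, by decide⟩
    have h1' : g.all (fun i => i == 1) = false := by
      simp only [Bool.eq_false_iff, ne_eq, List.all_eq_true, not_forall]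
      exact ⟨0, h0, by decide⟩
    have hlen2 : (PySem.Set.ofList g).length = 2 := by
      have hc := congrArg List.length h
      simp only [keySig, PySem.List.length_sorted, List.length_cons, List.length_nil] at hc
      simpa using hc
    simp [qX, hw, h1', hin, PySem.Set.len, hlen2]

-- the combined per-genome predicates (length test and branch)
def pLen (cn : Int) (g : List Int) : Bool := (g.length : Int) == cn
def pW (cn : Int) (g : List Int) : Bool := pLen cn g && qW g
def pM (cn : Int) (g : List Int) : Bool := pLen cn g && qM g
def pX (cn : Int) (g : List Int) : Bool := pLen cn g && qX g

-- A's fold computes the three predicate counts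
theorem foldA_eq (cn : Int) : ∀ (gs : List (List Int)) (w m x : Int),
    gs.foldl (fun (st : Int × Int × Int) (genome : List Int) =>
      let (all_wt, all_mut, mixed) := st
      if (genome.length : Int) ≠ cn then st
      else if genome.all (fun i => i == 0) then (all_wt + 1, all_mut, mixed)
      else if genome.all (fun i => i == 1) then (all_wt, all_mut + 1, mixed)
      else if PySem.Set.len (PySem.Set.ofList genome) > 1 ∧ genome.all (fun i => i == 0 || i == 1) then
        (all_wt, all_mut, mixed + 1)
      else st) (w, m, x)
    = (w + (gs.countP (pW cn) : Int), m + (gs.countP (pM cn) : Int), x + (gs.countP (pX cn) : Int)) := by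
  intro gs
  induction gs with
  | nil => intro w m x; simp
  | cons g t ih =>
    intro w m x
    simp only [List.foldl_cons, List.countP_cons]
    by_cases hl : (g.length : Int) ≠ cn
    · have hpl : pLen cn g = false := by simp [pLen, hl]
      rw [if_pos hl, ih]
      simp [pW, pM, pX, hpl]
    · have hpl : pLen cn g = true := by simp only [ne_eq, not_not] at hl; simp [pLen, hl]
      rw [if_neg hl]
      by_cases h0 : g.all (fun i => i == 0) = true
      · have hw : qW g = true := h0
        have hm : qM g = false := by simp [qM, hw]
        have hx : qX g = false := by simp [qX, hw]
        rw [if_pos h0, ih]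
        simp only [pW, pM, pX, hpl, hw, hm, hx, Bool.true_and, if_true, if_false,
          Bool.false_eq_true, Nat.cast_add, Nat.cast_one]
        refine Prod.ext (by dsimp; ring) (Prod.ext (by dsimp; ring) (by dsimp; ring))
      · have hw : qW g = false := by rw [Bool.eq_false_iff]; exact h0
        rw [if_neg h0]
        by_cases h1 : g.all (fun i => i == 1) = true
        · have hm : qM g = true := by simp [qM, hw, h1]
          have hx : qX g = false := by simp [qX, h1]
          rw [if_pos h1, ih]
          simp only [pW, pM, pX, hpl, hw, hm, hx, Bool.true_and, if_true, if_false,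
            Bool.false_eq_true, Nat.cast_add, Nat.cast_one]
          refine Prod.ext (by dsimp; ring) (Prod.ext (by dsimp; ring) (by dsimp; ring))
        · have h1' : (g.all (fun i => i == 1)) = false := by rw [Bool.eq_false_iff]; exact h1
          rw [if_neg h1]
          by_cases hc : PySem.Set.len (PySem.Set.ofList g) > 1 ∧ g.all (fun i => i == 0 || i == 1) = true
          · have hcl : 1 < (PySem.Set.ofList g).length := by
              have h' := hc.1
              simp only [PySem.Set.len] at h'
              exact_mod_cast h'
            have hx : qX g = true := by
              simp [qX, hw, h1', genomeIn01, hc.2, PySem.Set.len, hcl]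
            have hm : qM g = false := by simp [qM, h1']
            rw [if_pos hc, ih]
            simp only [pW, pM, pX, hpl, hw, hm, hx, Bool.true_and, if_true, if_false,
              Bool.false_eq_true, Nat.cast_add, Nat.cast_one]
            refine Prod.ext (by dsimp; ring) (Prod.ext (by dsimp; ring) (by dsimp; ring))
          · have hx : qX g = false := by
              simp only [qX, genomeIn01, Bool.and_eq_false_iff]
              right
              simpa using hc
            have hm : qM g = false := by simp [qM, h1']
            rw [if_neg hc, ih]
            simp [pW, pM, pX, hpl, hw, hm, hx]

-- counting one signature literal in B's sigs list equals counting the matching predicate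
theorem count_sig_eq (genomes : List (List Int)) (cn : Int) (s : List Int) :
    PySem.List.count ((genomes.filter (fun g => (g.length : Int) == cn)).map keySig) s
      = genomes.countP (fun g => pLen cn g && (keySig g == s)) := by
  rw [PySem.List.count_eq, List.count_eq_countP, List.countP_map, List.countP_filter]
  apply List.countP_congr
  intro g _
  simp only [Function.comp, pLen, Bool.and_eq_true]
  tauto

-- disjoint predicates split a countP of their disjunction
theorem countP_disjoint_add {α : Type} (p q : α → Bool) (l : List α)
    (h : ∀ a ∈ l, ¬(p a = true ∧ q a = true)) :
    l.countP (fun a => p a || q a) = l.countP p + l.countP q := by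
  induction l with
  | nil => simp
  | cons a t ih =>
    have ht : ∀ b ∈ t, ¬(p b = true ∧ q b = true) := fun b hb => h b (List.mem_cons_of_mem a hb)
    rcases Bool.eq_false_or_eq_true (p a) with hp | hp <;>
      rcases Bool.eq_false_or_eq_true (q a) with hq | hq
    · exact absurd ⟨hp, hq⟩ (h a List.mem_cons_self)
    · simp [ih ht, hp, hq]
      omega
    · simp [ih ht, hp, hq]
      omega
    · simp [ih ht, hp, hq]

-- the two ports agree
theorem count_eq_alt (genomes : List (List Int)) (cn : Int) :
    count genomes cn = count_alt genomes cn := by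
  unfold count count_alt
  rw [foldA_eq cn genomes 0 0 0]
  simp only [zero_add]
  rw [count_sig_eq genomes cn [], count_sig_eq genomes cn [0],
      count_sig_eq genomes cn [0, 1], count_sig_eq genomes cn [1]]
  have hW : genomes.countP (pW cn)
      = genomes.countP (fun g => pLen cn g && (keySig g == [])) +
        genomes.countP (fun g => pLen cn g && (keySig g == [0])) := by
    rw [← countP_disjoint_add _ _ _ (by
      rintro g - ⟨h1, h2⟩
      simp only [Bool.and_eq_true, beq_iff_eq] at h1 h2
      rw [h1.2] at h2
      exact absurd h2.2 (by decide))]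
    apply List.countP_congr
    intro g _
    simp only [pW, Bool.and_eq_true, Bool.or_eq_true, beq_iff_eq, qW_iff_sig]
    tauto
  have hM : genomes.countP (pM cn)
      = genomes.countP (fun g => pLen cn g && (keySig g == [1])) := by
    apply List.countP_congr
    intro g _
    simp only [pM, Bool.and_eq_true, beq_iff_eq, qM_iff_sig]
  have hX : genomes.countP (pX cn)
      = genomes.countP (fun g => pLen cn g && (keySig g == [0, 1])) := by
    apply List.countP_congr
    intro g _
    simp only [pX, Bool.and_eq_true, beq_iff_eq, qX_iff_sig]
  rw [hW, hM, hX]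
  push_cast
  rfl

-- ===== VERDICT (by name: the statement is the Claim_ definition above) =====
theorem count_spec : Claim_equal_count := by
  intro genomes cn _
  exact count_eq_alt genomes cn
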